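-- pv_equiv track=rewrite | github.com/LxMLearners/BicTric | src/preprocessing/als_preprocess.py | compute_consecutive_snapshots_n
-- ===== SOURCE A (Python) =====
-- def compute_consecutive_snapshots_n(data, n, label, yes_label='Y', strategy='flexible'):
--     """
--
--     Parameters
--     ----------
--     data: is a dict with ALS data with the format returned by `df_to_dict`
--     n: is the number of consecutive snapshots to consider, ie. the size of snapshots set
--         the size of snapshots set could be defined
--     label: is the target problem
--     strategy: (default) `flexible` - sets of snapshots have a maximum size `n`
--                 `strict` - sets of snapshots have a strict size of `n`
--
--     """
--
--     final = dict()
--     for (p, t) in data.items():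
--         if len(t.keys()) >= n:
--             fd = dict()
--             for (key, val) in t.items():
--                 fd[key] = val
--                 final[p] = fd
--
--     snaps = dict()
--     for (p, ts) in data.items():
--         for t in ts.keys():
--
--             size_t = len(ts.keys())
--             if strategy == 'flexible':
--                 size_n = min(n, size_t)
--             elif strategy == 'strict':
--                 size_n = n
--             else:
--                 raise ValueError('Invalid Strategy')
--             if t < size_t - (size_n-1) and all(map(lambda c: c != yes_label, [data[p][t+y][label] for y in range(0, size_n-1)])):
--                 if p not in snaps:
--                     snaps[p] = list()
--                 snaps[p].append([(t+j, data[p][t+j][label])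
--                                 for j in range(0, size_n)])
--     return snaps
-- ===== SOURCE B (Python) =====
-- def compute_consecutive_snapshots_n(data, n, label, yes_label='Y', strategy='flexible'):
--     snaps = dict()
--     for (p, ts) in data.items():
--         if not ts:
--             continue
--         size_t = len(ts)
--         if strategy == 'flexible':
--             size_n = min(n, size_t)
--         elif strategy == 'strict':
--             size_n = n
--         else:
--             raise ValueError('Invalid Strategy')
--         # one descending pass: next_yes[t] = smallest key >= t whose label is yes_label (or None)
--         next_yes = {}
--         nxt = None
--         for k in sorted(ts, reverse=True):
--             if ts[k].get(label) == yes_label: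
--                 nxt = k
--             next_yes[k] = nxt
--         bound = size_t - (size_n - 1)
--         windows = []
--         for t in ts:
--             if t < bound and (next_yes[t] is None or t + size_n - 2 < next_yes[t]):
--                 windows.append([(t + j, ts[t + j][label]) for j in range(size_n)])
--         if windows:
--             snaps[p] = windows
--     return snaps
-- ===== Notes on version B (the rewrite author's own statement) =====
-- stated objective: faster
-- what changed: B drops A's dead `final` loop and replaces A's per-timepoint O(size_n) rescan of window labels (all(map(...)) over a rebuilt value list) by one descending sorted pass per patient that builds a next_yes index (smallest timepoint >= t carrying yes_label), so each timepoint is accepted by an O(1) lookup; windows with matches are collected per patient and inserted once.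
import Mathlib
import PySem

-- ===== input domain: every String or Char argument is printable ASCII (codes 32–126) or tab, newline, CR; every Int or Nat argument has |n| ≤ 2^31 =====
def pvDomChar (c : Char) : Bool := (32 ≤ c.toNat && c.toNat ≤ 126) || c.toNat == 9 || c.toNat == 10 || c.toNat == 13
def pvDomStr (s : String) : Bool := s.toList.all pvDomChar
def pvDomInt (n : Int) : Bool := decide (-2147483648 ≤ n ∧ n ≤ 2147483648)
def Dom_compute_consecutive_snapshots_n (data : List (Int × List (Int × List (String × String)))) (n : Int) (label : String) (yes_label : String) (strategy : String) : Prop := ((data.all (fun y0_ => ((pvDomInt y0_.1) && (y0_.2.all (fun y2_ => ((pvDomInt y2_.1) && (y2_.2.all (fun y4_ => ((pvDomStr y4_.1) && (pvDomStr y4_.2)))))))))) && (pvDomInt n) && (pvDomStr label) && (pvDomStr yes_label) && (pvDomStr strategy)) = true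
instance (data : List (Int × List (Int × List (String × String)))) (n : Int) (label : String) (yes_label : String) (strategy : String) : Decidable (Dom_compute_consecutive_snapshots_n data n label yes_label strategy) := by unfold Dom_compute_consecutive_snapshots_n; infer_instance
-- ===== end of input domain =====

-- B replaces A's per-window O(size_n) rescan for a yes-label with a single descending
-- pass per patient building a next-yes index (and drops A's dead `final` loop): faster.

-- shared input normalisation (the Python arguments are dicts; the assoc-list arguments
-- are read with Python dict construction semantics: last duplicate wins, first position)
def pvNormTs (ts : List (Int × List (String × String))) : PySem.Dict Int (PySem.Dict String String) :=
  PySem.Dict.ofList (ts.map (fun r => (r.1, PySem.Dict.ofList r.2)))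

def pvNormData (data : List (Int × List (Int × List (String × String)))) :
    PySem.Dict Int (PySem.Dict Int (PySem.Dict String String)) :=
  PySem.Dict.ofList (data.map (fun q => (q.1, pvNormTs q.2)))

-- ===== PORT A =====
def compute_consecutive_snapshots_n (data : List (Int × List (Int × List (String × String)))) (n : Int) (label : String) (yes_label : String) (strategy : String) : List (Int × List (List (Int × String))) :=
  let ds := pvNormData data
  -- A's `final` loop (its result is never used; transcribed for fidelity)
  let _final : PySem.Dict Int (PySem.Dict Int (PySem.Dict String String)) :=
    ds.items.foldl (fun final pt =>
      if (pt.2.size : Int) ≥ n then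
        (pt.2.items.foldl
          (fun (st : PySem.Dict Int (PySem.Dict String String) × PySem.Dict Int (PySem.Dict Int (PySem.Dict String String))) kv =>
            let fd := st.1.insert kv.1 kv.2
            (fd, st.2.insert pt.1 fd)) (PySem.Dict.empty, final)).2
      else final) PySem.Dict.empty
  let snaps : PySem.Dict Int (List (List (Int × String))) :=
    ds.items.foldl (fun snaps pt =>
      pt.2.keys.foldl (fun snaps t =>
        let size_t : Int := (pt.2.size : Int)
        let size_n : Int :=
          if strategy = "flexible" then min n size_t
          else if strategy = "strict" then n
          else n  -- Python raises ValueError here; such inputs are outside Pre_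
        if decide (t < size_t - (size_n - 1)) &&
            (((PySem.List.pyRange 0 (size_n - 1) 1).map
                (fun y => ((ds.getD pt.1 PySem.Dict.empty).getD (t + y) PySem.Dict.empty).getD label "")).all
              (fun c => c != yes_label)) then
          let snaps1 := if snaps.contains pt.1 then snaps else snaps.insert pt.1 []
          snaps1.insert pt.1 (snaps1.getD pt.1 [] ++
            [(PySem.List.pyRange 0 size_n 1).map
              (fun j => (t + j, ((ds.getD pt.1 PySem.Dict.empty).getD (t + j) PySem.Dict.empty).getD label ""))])
        else snaps) snaps) PySem.Dict.empty
  snaps.items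

-- ===== PORT B =====
def compute_consecutive_snapshots_n_alt (data : List (Int × List (Int × List (String × String)))) (n : Int) (label : String) (yes_label : String) (strategy : String) : List (Int × List (List (Int × String))) :=
  let ds := pvNormData data
  (ds.items.foldl (fun snaps pt =>
    if pt.2.size = 0 then snaps
    else
      let size_t : Int := (pt.2.size : Int)
      let size_n : Int := if strategy = "flexible" then min n size_t
        else n  -- "strict"; any other strategy raises ValueError in Python and is outside Pre_
      let st := (PySem.List.sorted pt.2.keys (fun k => k) true).foldl
        (fun (st : PySem.Dict Int (Option Int) × Option Int) k =>
          let nxt := if (pt.2.getD k PySem.Dict.empty).get? label == some yes_label then some k else st.2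
          (st.1.insert k nxt, nxt)) (PySem.Dict.empty, none)
      let bound := size_t - (size_n - 1)
      let windows : List (List (Int × String)) := pt.2.keys.foldl (fun ws t =>
        if decide (t < bound) &&
            (match st.1.getD t none with
              | none => true
              | some k => decide (t + size_n - 2 < k)) then
          ws ++ [(PySem.List.pyRange 0 size_n 1).map
            (fun j => (t + j, (pt.2.getD (t + j) PySem.Dict.empty).getD label ""))]
        else ws) []
      if windows.isEmpty then snaps else snaps.insert pt.1 windows)
    (PySem.Dict.empty : PySem.Dict Int (List (List (Int × String))))).items

-- ===== PRECONDITION & SPEC =====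
def pvSizeN (strategy : String) (n size_t : Int) : Int :=
  if strategy = "flexible" then min n size_t else n

def pvRowOk (ts : PySem.Dict Int (PySem.Dict String String)) (label : String) (k : Int) : Bool :=
  ((ts.get? k).bind (fun row => row.get? label)).isSome

def pvVal (ts : PySem.Dict Int (PySem.Dict String String)) (label : String) (k : Int) : String :=
  (ts.getD k PySem.Dict.empty).getD label ""

-- Pre_ holds exactly when the Python A returns normally: a valid strategy whenever some
-- patient has a timepoint (else ValueError), and every dict access A performs succeeds
-- (else KeyError): for each timepoint t passing A's bound test, the whole prefix window
-- exists with the label present, and — if the prefix carries no yes_label and the window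
-- is nonempty (0 < size_n) — the final window element exists with the label present too.
def Pre_compute_consecutive_snapshots_n (data : List (Int × List (Int × List (String × String)))) (n : Int) (label : String) (yes_label : String) (strategy : String) : Prop :=
  ((∃ pt ∈ (pvNormData data).items, pt.2.size ≠ 0) → strategy = "flexible" ∨ strategy = "strict") ∧
  ∀ pt ∈ (pvNormData data).items, ∀ t ∈ pt.2.keys,
    t < (pt.2.size : Int) - (pvSizeN strategy n (pt.2.size : Int) - 1) →
      (∀ y ∈ PySem.List.pyRange 0 (pvSizeN strategy n (pt.2.size : Int) - 1) 1,
          pvRowOk pt.2 label (t + y) = true) ∧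
      ((∀ y ∈ PySem.List.pyRange 0 (pvSizeN strategy n (pt.2.size : Int) - 1) 1,
          pvVal pt.2 label (t + y) ≠ yes_label) →
        0 < pvSizeN strategy n (pt.2.size : Int) →
        pvRowOk pt.2 label (t + pvSizeN strategy n (pt.2.size : Int) - 1) = true)

instance (data : List (Int × List (Int × List (String × String)))) (n : Int) (label : String) (yes_label : String) (strategy : String) : Decidable (Pre_compute_consecutive_snapshots_n data n label yes_label strategy) := by unfold Pre_compute_consecutive_snapshots_n; infer_instance

def pvWitness_compute_consecutive_snapshots_n : (List (Int × List (Int × List (String × String)))) × Int × String × String × String :=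
  ([(0, [(0, [("a", "N")]), (1, [("a", "N")])])], 2, "a", "Y", "flexible")

def Spec_compute_consecutive_snapshots_n (data : List (Int × List (Int × List (String × String)))) (n : Int) (label : String) (yes_label : String) (strategy : String) (out : List (Int × List (List (Int × String)))) : Prop := out = compute_consecutive_snapshots_n_alt data n label yes_label strategy
instance (data : List (Int × List (Int × List (String × String)))) (n : Int) (label : String) (yes_label : String) (strategy : String) (out : List (Int × List (List (Int × String)))) : Decidable (Spec_compute_consecutive_snapshots_n data n label yes_label strategy out) := by unfold Spec_compute_consecutive_snapshots_n; infer_instance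

-- ===== CLAIM (what is proved, stated in full; the proofs are below) =====
def Claim_equal_compute_consecutive_snapshots_n : Prop := ∀ (data : List (Int × List (Int × List (String × String)))) (n : Int) (label : String) (yes_label : String) (strategy : String), Dom_compute_consecutive_snapshots_n data n label yes_label strategy → Pre_compute_consecutive_snapshots_n data n label yes_label strategy → Spec_compute_consecutive_snapshots_n data n label yes_label strategy (compute_consecutive_snapshots_n data n label yes_label strategy)

-- ===== LEMMAS AND PROOFS =====

-- values of a dict built by an insert fold come from the start dict or the pair list
theorem pv_values_foldl {κ ν : Type} [BEq κ] [LawfulBEq κ] (l : List (κ × ν)) (d : PySem.Dict κ ν) :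
    ∀ w ∈ (l.foldl (fun d p => d.insert p.1 p.2) d).values, w ∈ d.values ∨ w ∈ l.map Prod.snd := by
  induction l generalizing d with
  | nil => simp
  | cons q l ih =>
    intro w hw
    rcases ih (d.insert q.1 q.2) w hw with h | h
    · rcases PySem.Dict.mem_values_insert d q.1 q.2 w h with h' | h'
      · right; simp [h']
      · left; exact h'
    · right; simp [h]

-- every timepoint dict appearing in the normalised data has duplicate-free keys
theorem pv_ts_nodup (data : List (Int × List (Int × List (String × String)))) :
    ∀ pt ∈ (pvNormData data).items, pt.2.keys.Nodup := by
  intro pt hpt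
  have hv : pt.2 ∈ (pvNormData data).values := by
    simp only [PySem.Dict.values]
    exact List.mem_map.mpr ⟨pt, hpt, rfl⟩
  have : pt.2 ∈ (PySem.Dict.empty : PySem.Dict Int (PySem.Dict Int (PySem.Dict String String))).values ∨
      pt.2 ∈ (data.map (fun q => (q.1, pvNormTs q.2))).map Prod.snd :=
    pv_values_foldl _ _ _ hv
  rcases this with h | h
  · simp [PySem.Dict.empty, PySem.Dict.values] at h
  · simp only [List.map_map] at h
    rcases List.mem_map.mp h with ⟨r, _, hr⟩
    rw [← hr]
    exact PySem.Dict.nodup_keys_ofList _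

-- the scan value of the descending next-yes pass
def pvNY (isYes : Int → Bool) : List Int → Option Int → Int → Option Int
  | [], nxt, _ => nxt
  | k :: L, nxt, t =>
    let nxt' := if isYes k then some k else nxt
    if k = t then nxt' else pvNY isYes L nxt' t

-- "no yes-label at or below this candidate": the test B performs on a next-yes entry
def pvGt (m : Int) : Option Int → Bool
  | none => true
  | some j => decide (m < j)

theorem pv_fold_get?_of_not_mem (isYes : Int → Bool) (L : List Int)
    (a : PySem.Dict Int (Option Int) × Option Int) (t : Int) (ht : t ∉ L) :
    ((L.foldl (fun st k => ((st.1.insert k (if isYes k then some k else st.2)),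
        (if isYes k then some k else st.2))) a).1).get? t = a.1.get? t := by
  induction L generalizing a with
  | nil => rfl
  | cons k L ih =>
    simp only [List.mem_cons, not_or] at ht
    simp only [List.foldl_cons]
    rw [ih _ ht.2, PySem.Dict.get?_insert]
    simp [ht.1]

theorem pv_fold_get?_mem (isYes : Int → Bool) (L : List Int) (hnd : L.Nodup) (t : Int) (ht : t ∈ L)
    (a : PySem.Dict Int (Option Int) × Option Int) :
    ((L.foldl (fun st k => ((st.1.insert k (if isYes k then some k else st.2)),
        (if isYes k then some k else st.2))) a).1).get? t = some (pvNY isYes L a.2 t) := by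
  induction L generalizing a with
  | nil => cases ht
  | cons k L ih =>
    simp only [List.foldl_cons]
    by_cases hk : k = t
    · subst hk
      have hnot : k ∉ L := (List.nodup_cons.mp hnd).1
      rw [pv_fold_get?_of_not_mem isYes L _ k hnot, PySem.Dict.get?_insert]
      simp [pvNY]
    · have ht' : t ∈ L := by
        rcases List.mem_cons.mp ht with h | h
        · exact absurd h.symm hk
        · exact h
      rw [ih (List.nodup_cons.mp hnd).2 ht']
      simp [pvNY, hk]

theorem pv_NY_cond (isYes : Int → Bool) (L : List Int) (hL : L.Pairwise (· > ·))
    (nxt : Option Int) (hn : ∀ k ∈ L, ∀ j, nxt = some j → k < j) (t m : Int) (ht : t ∈ L) :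
    pvGt m (pvNY isYes L nxt t)
      = ((decide (∀ k ∈ L, t ≤ k → k ≤ m → isYes k = false)) && pvGt m nxt) := by
  induction L generalizing nxt with
  | nil => cases ht
  | cons k L ih =>
    have hk : ∀ b ∈ L, k > b := fun b hb => (List.pairwise_cons.mp hL).1 b hb
    have hL' := (List.pairwise_cons.mp hL).2
    have hforall : (decide (∀ b ∈ k :: L, t ≤ b → b ≤ m → isYes b = false))
        = ((decide (t ≤ k → k ≤ m → isYes k = false)) && (decide (∀ b ∈ L, t ≤ b → b ≤ m → isYes b = false))) := by
      rw [Bool.eq_iff_iff]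
      simp
    rw [hforall]
    by_cases hkt : k = t
    · subst hkt
      have h2 : (decide (∀ b ∈ L, k ≤ b → b ≤ m → isYes b = false)) = true := by
        simp only [decide_eq_true_eq]
        intro b hb h1 h2
        exact absurd (hk b hb) (by omega)
      simp only [pvNY, h2, Bool.and_true]
      by_cases hy : isYes k
      · simp only [if_pos hy]
        by_cases hm : m < k
        · have h3 : pvGt m nxt = true := by
            cases hnx : nxt with
            | none => rfl
            | some j => simp only [pvGt, decide_eq_true_eq]; have := hn k (by simp) j hnx; omega
          have h1 : (decide (k ≤ k → k ≤ m → isYes k = false)) = true := by simp; omega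
          rw [h1, h3]
          simp [pvGt, hm]
        · have h1 : (decide (k ≤ k → k ≤ m → isYes k = false)) = false := by
            simp [hy]; omega
          rw [h1]
          simp [pvGt, hm]
      · simp only [if_neg hy]
        have h1 : (decide (k ≤ k → k ≤ m → isYes k = false)) = true := by simp [hy]
        rw [h1, Bool.true_and]
        simp
    · have ht' : t ∈ L := by
        rcases List.mem_cons.mp ht with h | h
        · exact absurd h.symm hkt
        · exact h
      have hkgt : k > t := hk t ht'
      simp only [pvNY, if_neg hkt]
      by_cases hy : isYes k
      · simp only [if_pos hy]
        rw [ih hL' (some k) (fun b hb j hj => by cases hj; exact hk b hb) ht']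
        have h1 : (decide (t ≤ k → k ≤ m → isYes k = false)) = decide (m < k) := by
          by_cases hm : m < k
          · have hx : (t ≤ k → k ≤ m → isYes k = false) := fun _ h2 => absurd h2 (by omega)
            simp [hm]
          · have hx : ¬ (t ≤ k → k ≤ m → isYes k = false) := by
              intro himp; have := himp (by omega) (by omega); simp [hy] at this
            simp [hx, hm]
        rw [h1]
        by_cases hm : m < k
        · have h3 : pvGt m nxt = true := by
            cases hnx : nxt with
            | none => rfl
            | some j => simp only [pvGt, decide_eq_true_eq]; have := hn k (by simp) j hnx; omega
          rw [h3]
          have h4 : pvGt m (some k) = true := by simp [pvGt, hm]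
          rw [h4]
          simp [hm]
        · have h4 : pvGt m (some k) = false := by simp [pvGt, hm]
          rw [h4]
          simp [hm]
      · simp only [if_neg hy]
        rw [ih hL' nxt (fun b hb j hj => hn b (by simp [hb]) j hj) ht']
        have h1 : (decide (t ≤ k → k ≤ m → isYes k = false)) = true := by simp [hy]
        rw [h1, Bool.true_and]

-- the B-side per-timepoint test equals the "no yes-label in the window prefix" test
theorem pv_condB (isYes : Int → Bool) (ks : List Int) (hnd : ks.Nodup) (t m : Int) (ht : t ∈ ks) :
    pvGt m ((((PySem.List.sorted ks (fun k => k) true).foldl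
        (fun (st : PySem.Dict Int (Option Int) × Option Int) k =>
          ((st.1.insert k (if isYes k then some k else st.2)),
           (if isYes k then some k else st.2)))
        (PySem.Dict.empty, none)).1).getD t none)
      = decide (∀ k ∈ ks, t ≤ k → k ≤ m → isYes k = false) := by
  have hperm : (PySem.List.sorted ks (fun k => k) true).Perm ks :=
    PySem.List.sorted_perm ks (fun k => k) true
  have hndL : (PySem.List.sorted ks (fun k => k) true).Nodup := hperm.nodup_iff.mpr hnd
  have hgt : (PySem.List.sorted ks (fun k => k) true).Pairwise (· > ·) := by
    refine ((PySem.List.sorted_pairwise_rev ks (fun k => k)).and hndL).imp ?_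
    rintro a b ⟨h1, h2⟩
    exact lt_of_le_of_ne h1 (fun e => h2 e.symm)
  have htL : t ∈ PySem.List.sorted ks (fun k => k) true :=
    (PySem.List.mem_sorted ks (fun k => k) true t).mpr ht
  rw [PySem.Dict.getD_eq_get?_getD,
    pv_fold_get?_mem isYes _ hndL t htL (PySem.Dict.empty, none)]
  have := pv_NY_cond isYes _ hgt none (by simp) t m htL
  simp only [Option.getD_some]
  rw [this]
  have hmem : (decide (∀ k ∈ PySem.List.sorted ks (fun k => k) true, t ≤ k → k ≤ m → isYes k = false))
      = decide (∀ k ∈ ks, t ≤ k → k ≤ m → isYes k = false) := by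
    rw [decide_eq_decide]
    constructor
    · intro h k hk; exact h k ((PySem.List.mem_sorted ks (fun k => k) true k).mpr hk)
    · intro h k hk; exact h k ((PySem.List.mem_sorted ks (fun k => k) true k).mp hk)
  rw [hmem]
  simp [pvGt]

-- the A-side all(...) rescan is the same test, given the accessed rows exist
theorem pv_condA (ts : PySem.Dict Int (PySem.Dict String String)) (label yes_label : String)
    (size_n t : Int)
    (hok : ∀ y ∈ PySem.List.pyRange 0 (size_n - 1) 1, pvRowOk ts label (t + y) = true) :
    (((PySem.List.pyRange 0 (size_n - 1) 1).map
        (fun y => (ts.getD (t + y) PySem.Dict.empty).getD label "")).all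
        (fun c => c != yes_label))
      = decide (∀ k ∈ ts.keys, t ≤ k → k ≤ t + size_n - 2 →
          ((ts.getD k PySem.Dict.empty).get? label == some yes_label) = false) := by
  rw [Bool.eq_iff_iff]
  simp only [List.all_eq_true, List.mem_map, decide_eq_true_eq, forall_exists_index, and_imp,
    forall_apply_eq_imp_iff₂, bne_iff_ne, ne_eq]
  constructor
  · intro h k hk h1 h2
    have hy : t ≤ k - t + t ∧ k - t + t ≤ t + size_n - 2 := by omega
    have hmem : k - t ∈ PySem.List.pyRange 0 (size_n - 1) 1 := by
      rw [PySem.List.mem_pyRange_one]; omega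
    have hro := hok (k - t) hmem
    simp only [pvRowOk] at hro
    cases hg : ts.get? (t + (k - t)) with
    | none => rw [hg] at hro; simp at hro
    | some row =>
      rw [hg] at hro
      simp only [Option.bind_some] at hro
      cases hr : row.get? label with
      | none => rw [hr] at hro; simp at hro
      | some v =>
        have hktk : t + (k - t) = k := by omega
        have hval := h (k - t) hmem
        have hgd : ts.getD (t + (k - t)) PySem.Dict.empty = row := by
          rw [PySem.Dict.getD_eq_get?_getD, hg]; rfl
        rw [hgd] at hval
        have hvd : row.getD label "" = v := by
          rw [PySem.Dict.getD_eq_get?_getD, hr]; rfl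
        rw [hvd] at hval
        rw [← hktk, hgd, hr]
        simp only [beq_eq_false_iff_ne, ne_eq, Option.some.injEq]
        exact hval
  · intro h y hy
    have hro := hok y hy
    simp only [pvRowOk] at hro
    cases hg : ts.get? (t + y) with
    | none => rw [hg] at hro; simp at hro
    | some row =>
      rw [hg] at hro
      simp only [Option.bind_some] at hro
      cases hr : row.get? label with
      | none => rw [hr] at hro; simp at hro
      | some v =>
        have hbounds := (PySem.List.mem_pyRange_one).mp hy
        have hmemk : t + y ∈ ts.keys := by
          by_contra hc
          rw [← PySem.Dict.get?_eq_none_iff_not_mem_keys] at hc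
          rw [hc] at hg; cases hg
        have hfalse := h (t + y) hmemk (by omega) (by omega)
        have hgd : ts.getD (t + y) PySem.Dict.empty = row := by
          rw [PySem.Dict.getD_eq_get?_getD, hg]; rfl
        rw [hgd, hr] at hfalse
        simp only [beq_eq_false_iff_ne, ne_eq, Option.some.injEq] at hfalse
        rw [hgd, PySem.Dict.getD_eq_get?_getD, hr]
        exact hfalse

-- A's per-patient dict loop, collected: present-key case
theorem pv_dictfold_present {ν : Type} (p : Int) (cond : Int → Bool) (w : Int → ν)
    (ks : List Int) (S : PySem.Dict Int (List ν)) (acc : List ν) (hS : S.get? p = some acc) :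
    ks.foldl (fun snaps t => if cond t then
        ((if snaps.contains p then snaps else snaps.insert p []).insert p
          ((if snaps.contains p then snaps else snaps.insert p []).getD p [] ++ [w t]))
      else snaps) S
      = if ((ks.filter cond).map w).isEmpty then S
        else S.insert p (acc ++ (ks.filter cond).map w) := by
  induction ks generalizing S acc with
  | nil => simp
  | cons t ks ih =>
    by_cases hc : cond t
    · have hcont : S.contains p = true := by
        rw [PySem.Dict.contains_eq_isSome_get?, hS]; rfl
      have hgd : S.getD p [] = acc := by
        rw [PySem.Dict.getD_eq_get?_getD, hS]; rfl
      simp only [List.foldl_cons, if_pos hc, hcont, if_true, hgd]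
      rw [ih (S.insert p (acc ++ [w t])) (acc ++ [w t]) (PySem.Dict.get?_insert_self S p _)]
      simp only [List.filter_cons, hc, if_true, List.map_cons, List.isEmpty_cons]
      by_cases he : ((ks.filter cond).map w).isEmpty
      · rw [if_pos he]
        have : (ks.filter cond).map w = [] := List.isEmpty_iff.mp he
        rw [this]
        simp
      · rw [if_neg he, PySem.Dict.insert_insert_self]
        have : (ks.filter cond).map w ≠ [] := by
          intro h; rw [h] at he; simp at he
        simp [List.append_assoc]
    · simp only [List.foldl_cons, if_neg hc]
      rw [ih S acc hS]
      simp [hc]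

-- A's per-patient dict loop, collected: fresh-key case
theorem pv_dictfold_absent {ν : Type} (p : Int) (cond : Int → Bool) (w : Int → ν)
    (ks : List Int) (S : PySem.Dict Int (List ν)) (hS : S.contains p = false) :
    ks.foldl (fun snaps t => if cond t then
        ((if snaps.contains p then snaps else snaps.insert p []).insert p
          ((if snaps.contains p then snaps else snaps.insert p []).getD p [] ++ [w t]))
      else snaps) S
      = if ((ks.filter cond).map w).isEmpty then S
        else S.insert p ((ks.filter cond).map w) := by
  induction ks generalizing S with
  | nil => simp
  | cons t ks ih =>
    by_cases hc : cond t
    · simp only [List.foldl_cons, if_pos hc, hS, if_false, Bool.false_eq_true]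
      rw [PySem.Dict.getD_insert_self, PySem.Dict.insert_insert_self]
      rw [pv_dictfold_present p cond w ks (S.insert p ([] ++ [w t])) ([] ++ [w t])
        (PySem.Dict.get?_insert_self S p _)]
      simp only [List.filter_cons, hc, if_true, List.map_cons, List.isEmpty_cons]
      by_cases he : ((ks.filter cond).map w).isEmpty
      · rw [if_pos he]
        have : (ks.filter cond).map w = [] := List.isEmpty_iff.mp he
        rw [this]
        simp
      · rw [if_neg he, PySem.Dict.insert_insert_self]
        simp
    · simp only [List.foldl_cons, if_neg hc]
      rw [ih S hS]
      simp [hc]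

-- generic outer-loop equality from agreement on fresh keys
theorem pv_outer {PT : Type} (fst : PT → Int)
    (stepA stepB : PySem.Dict Int (List (List (Int × String))) → PT → PySem.Dict Int (List (List (Int × String))))
    (items : List PT)
    (hstep : ∀ S pt, pt ∈ items → S.contains (fst pt) = false → stepA S pt = stepB S pt)
    (hpres : ∀ S pt q, q ≠ fst pt → S.contains q = false → (stepB S pt).contains q = false)
    (hnd : (items.map fst).Nodup)
    (S : PySem.Dict Int (List (List (Int × String))))
    (hS : ∀ q ∈ items.map fst, S.contains q = false) :
    items.foldl stepA S = items.foldl stepB S := by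
  induction items generalizing S with
  | nil => rfl
  | cons pt items ih =>
    simp only [List.foldl_cons]
    rw [hstep S pt (List.mem_cons_self) (hS _ (by simp))]
    exact ih (fun S' pt' h h' => hstep S' pt' (List.mem_cons_of_mem _ h) h')
      ((List.nodup_cons.mp (by simpa using hnd)).2)
      (stepB S pt)
      (fun q hq => hpres S pt q
        (by rintro rfl; exact (List.nodup_cons.mp (by simpa using hnd)).1 hq)
        (hS q (by simp [hq])))



theorem pv_witness_ok :
    Dom_compute_consecutive_snapshots_n pvWitness_compute_consecutive_snapshots_n.1 pvWitness_compute_consecutive_snapshots_n.2.1 pvWitness_compute_consecutive_snapshots_n.2.2.1 pvWitness_compute_consecutive_snapshots_n.2.2.2.1 pvWitness_compute_consecutive_snapshots_n.2.2.2.2 ∧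
    Pre_compute_consecutive_snapshots_n pvWitness_compute_consecutive_snapshots_n.1 pvWitness_compute_consecutive_snapshots_n.2.1 pvWitness_compute_consecutive_snapshots_n.2.2.1 pvWitness_compute_consecutive_snapshots_n.2.2.2.1 pvWitness_compute_consecutive_snapshots_n.2.2.2.2 := by
  decide

-- per-timepoint: A's test (bound + all(...) rescan) equals B's test (bound + next-yes lookup)
theorem pv_cond_eq (ts : PySem.Dict Int (PySem.Dict String String)) (label yes_label : String)
    (size_n t : Int) (hnd : ts.keys.Nodup) (ht : t ∈ ts.keys)
    (hok : t < (ts.size : Int) - (size_n - 1) →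
      ∀ y ∈ PySem.List.pyRange 0 (size_n - 1) 1, pvRowOk ts label (t + y) = true) :
    (decide (t < (ts.size : Int) - (size_n - 1)) &&
      ((List.map (fun y => (ts.getD (t + y) PySem.Dict.empty).getD label "")
          (PySem.List.pyRange 0 (size_n - 1) 1)).all (fun c => c != yes_label)))
    = (decide (t < (ts.size : Int) - (size_n - 1)) &&
      (match (List.foldl (fun (st : PySem.Dict Int (Option Int) × Option Int) k =>
            (st.1.insert k (if ((ts.getD k PySem.Dict.empty).get? label == some yes_label) = true then some k else st.2),
             if ((ts.getD k PySem.Dict.empty).get? label == some yes_label) = true then some k else st.2))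
          (PySem.Dict.empty, none) (PySem.List.sorted ts.keys (fun k => k) true)).1.getD t none with
        | none => true
        | some k => decide (t + size_n - 2 < k))) := by
  by_cases hb : t < (ts.size : Int) - (size_n - 1)
  · have hA := pv_condA ts label yes_label size_n t (hok hb)
    have hB := pv_condB (fun k => ((ts.getD k PySem.Dict.empty).get? label == some yes_label))
      ts.keys hnd t (t + size_n - 2) ht
    have hmatch : ∀ (x : Option Int),
        (match x with | none => true | some k => decide (t + size_n - 2 < k))
          = pvGt (t + size_n - 2) x := by
      intro x
      cases x <;> rfl
    have hglue : ((List.map (fun y => (ts.getD (t + y) PySem.Dict.empty).getD label "")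
          (PySem.List.pyRange 0 (size_n - 1) 1)).all (fun c => c != yes_label))
        = (match (List.foldl (fun (st : PySem.Dict Int (Option Int) × Option Int) k =>
            (st.1.insert k (if ((ts.getD k PySem.Dict.empty).get? label == some yes_label) = true then some k else st.2),
             if ((ts.getD k PySem.Dict.empty).get? label == some yes_label) = true then some k else st.2))
          (PySem.Dict.empty, none) (PySem.List.sorted ts.keys (fun k => k) true)).1.getD t none with
        | none => true
        | some k => decide (t + size_n - 2 < k)) :=
      hA.trans (hB.symm.trans (hmatch _).symm)
    rw [hglue]
  · simp [hb]

-- per-patient: A's dict loop for one patient equals B's window collection for it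
theorem pv_step (data : List (Int × List (Int × List (String × String)))) (n : Int)
    (label yes_label strategy : String)
    (hpre : Pre_compute_consecutive_snapshots_n data n label yes_label strategy)
    (S : PySem.Dict Int (List (List (Int × String))))
    (pt : Int × PySem.Dict Int (PySem.Dict String String))
    (hpt : pt ∈ (pvNormData data).items) (hS : S.contains pt.1 = false) :
    List.foldl (fun snaps t =>
      if (decide (t < (pt.2.size : Int) -
            ((if strategy = "flexible" then min n (pt.2.size : Int) else if strategy = "strict" then n else n) - 1)) &&
          ((List.map (fun y => (((pvNormData data).getD pt.1 PySem.Dict.empty).getD (t + y) PySem.Dict.empty).getD label "")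
              (PySem.List.pyRange 0 ((if strategy = "flexible" then min n (pt.2.size : Int) else if strategy = "strict" then n else n) - 1) 1)).all
            (fun c => c != yes_label))) = true then
        ((if snaps.contains pt.1 then snaps else snaps.insert pt.1 []).insert pt.1
          ((if snaps.contains pt.1 then snaps else snaps.insert pt.1 []).getD pt.1 [] ++
            [List.map (fun j => (t + j, (((pvNormData data).getD pt.1 PySem.Dict.empty).getD (t + j) PySem.Dict.empty).getD label ""))
              (PySem.List.pyRange 0 (if strategy = "flexible" then min n (pt.2.size : Int) else if strategy = "strict" then n else n) 1)]))
      else snaps) S pt.2.keys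
    = (if pt.2.size = 0 then S
      else
        if (List.foldl (fun ws t =>
            if (decide (t < (pt.2.size : Int) - ((if strategy = "flexible" then min n (pt.2.size : Int) else n) - 1)) &&
                (match (List.foldl (fun (st : PySem.Dict Int (Option Int) × Option Int) k =>
                      (st.1.insert k (if ((pt.2.getD k PySem.Dict.empty).get? label == some yes_label) = true then some k else st.2),
                       if ((pt.2.getD k PySem.Dict.empty).get? label == some yes_label) = true then some k else st.2))
                    (PySem.Dict.empty, none) (PySem.List.sorted pt.2.keys (fun k => k) true)).1.getD t none with
                  | none => true
                  | some k => decide (t + (if strategy = "flexible" then min n (pt.2.size : Int) else n) - 2 < k))) = true then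
              ws ++ [List.map (fun j => (t + j, (pt.2.getD (t + j) PySem.Dict.empty).getD label ""))
                (PySem.List.pyRange 0 (if strategy = "flexible" then min n (pt.2.size : Int) else n) 1)]
            else ws) [] pt.2.keys).isEmpty then S
        else S.insert pt.1 (List.foldl (fun ws t =>
            if (decide (t < (pt.2.size : Int) - ((if strategy = "flexible" then min n (pt.2.size : Int) else n) - 1)) &&
                (match (List.foldl (fun (st : PySem.Dict Int (Option Int) × Option Int) k =>
                      (st.1.insert k (if ((pt.2.getD k PySem.Dict.empty).get? label == some yes_label) = true then some k else st.2),
                       if ((pt.2.getD k PySem.Dict.empty).get? label == some yes_label) = true then some k else st.2))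
                    (PySem.Dict.empty, none) (PySem.List.sorted pt.2.keys (fun k => k) true)).1.getD t none with
                  | none => true
                  | some k => decide (t + (if strategy = "flexible" then min n (pt.2.size : Int) else n) - 2 < k))) = true then
              ws ++ [List.map (fun j => (t + j, (pt.2.getD (t + j) PySem.Dict.empty).getD label ""))
                (PySem.List.pyRange 0 (if strategy = "flexible" then min n (pt.2.size : Int) else n) 1)]
            else ws) [] pt.2.keys)) := by
  by_cases hsz : pt.2.size = 0
  · have hkeys : pt.2.keys = [] := by
      have hit : pt.2.items = [] := List.length_eq_zero_iff.mp hsz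
      show pt.2.items.map _ = _
      rw [hit]
      rfl
    rw [hkeys]
    simp [hsz]
  · rw [if_neg hsz]
    have hndts : pt.2.keys.Nodup := pv_ts_nodup data pt hpt
    have hndds : (pvNormData data).keys.Nodup := PySem.Dict.nodup_keys_ofList _
    have hds : (pvNormData data).getD pt.1 PySem.Dict.empty = pt.2 :=
      PySem.Dict.getD_of_mem_items _ hpt hndds _
    have hsn : (if strategy = "flexible" then min n (pt.2.size : Int) else if strategy = "strict" then n else n)
        = (if strategy = "flexible" then min n (pt.2.size : Int) else n) := by
      by_cases h1 : strategy = "flexible"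
      · simp [h1]
      · by_cases h2 : strategy = "strict" <;> simp [h1, h2]
    have e1 : List.foldl (fun snaps t =>
      if (decide (t < (pt.2.size : Int) -
            ((if strategy = "flexible" then min n (pt.2.size : Int) else if strategy = "strict" then n else n) - 1)) &&
          ((List.map (fun y => (((pvNormData data).getD pt.1 PySem.Dict.empty).getD (t + y) PySem.Dict.empty).getD label "")
              (PySem.List.pyRange 0 ((if strategy = "flexible" then min n (pt.2.size : Int) else if strategy = "strict" then n else n) - 1) 1)).all
            (fun c => c != yes_label))) = true then
        ((if snaps.contains pt.1 then snaps else snaps.insert pt.1 []).insert pt.1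
          ((if snaps.contains pt.1 then snaps else snaps.insert pt.1 []).getD pt.1 [] ++
            [List.map (fun j => (t + j, (((pvNormData data).getD pt.1 PySem.Dict.empty).getD (t + j) PySem.Dict.empty).getD label ""))
              (PySem.List.pyRange 0 (if strategy = "flexible" then min n (pt.2.size : Int) else if strategy = "strict" then n else n) 1)]))
      else snaps) S pt.2.keys
      = List.foldl (fun snaps t =>
      if (decide (t < (pt.2.size : Int) - ((if strategy = "flexible" then min n (pt.2.size : Int) else n) - 1)) &&
          (match (List.foldl (fun (st : PySem.Dict Int (Option Int) × Option Int) k =>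
                (st.1.insert k (if ((pt.2.getD k PySem.Dict.empty).get? label == some yes_label) = true then some k else st.2),
                 if ((pt.2.getD k PySem.Dict.empty).get? label == some yes_label) = true then some k else st.2))
              (PySem.Dict.empty, none) (PySem.List.sorted pt.2.keys (fun k => k) true)).1.getD t none with
            | none => true
            | some k => decide (t + (if strategy = "flexible" then min n (pt.2.size : Int) else n) - 2 < k))) = true then
        ((if snaps.contains pt.1 then snaps else snaps.insert pt.1 []).insert pt.1
          ((if snaps.contains pt.1 then snaps else snaps.insert pt.1 []).getD pt.1 [] ++
            [List.map (fun j => (t + j, (pt.2.getD (t + j) PySem.Dict.empty).getD label ""))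
              (PySem.List.pyRange 0 (if strategy = "flexible" then min n (pt.2.size : Int) else n) 1)]))
      else snaps) S pt.2.keys := by
      refine PySem.List.foldl_congr_mem pt.2.keys _ _ S ?_
      intro acc t ht
      rw [hds, hsn]
      rw [pv_cond_eq pt.2 label yes_label
        (if strategy = "flexible" then min n (pt.2.size : Int) else n) t hndts ht
        (fun hb => (hpre.2 pt hpt t ht hb).1)]
    rw [e1]
    have e2 := pv_dictfold_absent pt.1
      (fun t => (decide (t < (pt.2.size : Int) - ((if strategy = "flexible" then min n (pt.2.size : Int) else n) - 1)) &&
          (match (List.foldl (fun (st : PySem.Dict Int (Option Int) × Option Int) k =>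
                (st.1.insert k (if ((pt.2.getD k PySem.Dict.empty).get? label == some yes_label) = true then some k else st.2),
                 if ((pt.2.getD k PySem.Dict.empty).get? label == some yes_label) = true then some k else st.2))
              (PySem.Dict.empty, none) (PySem.List.sorted pt.2.keys (fun k => k) true)).1.getD t none with
            | none => true
            | some k => decide (t + (if strategy = "flexible" then min n (pt.2.size : Int) else n) - 2 < k))))
      (fun t => List.map (fun j => (t + j, (pt.2.getD (t + j) PySem.Dict.empty).getD label ""))
              (PySem.List.pyRange 0 (if strategy = "flexible" then min n (pt.2.size : Int) else n) 1))
      pt.2.keys S hS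
    have e3 := PySem.List.foldl_append_if
      (fun t => (decide (t < (pt.2.size : Int) - ((if strategy = "flexible" then min n (pt.2.size : Int) else n) - 1)) &&
          (match (List.foldl (fun (st : PySem.Dict Int (Option Int) × Option Int) k =>
                (st.1.insert k (if ((pt.2.getD k PySem.Dict.empty).get? label == some yes_label) = true then some k else st.2),
                 if ((pt.2.getD k PySem.Dict.empty).get? label == some yes_label) = true then some k else st.2))
              (PySem.Dict.empty, none) (PySem.List.sorted pt.2.keys (fun k => k) true)).1.getD t none with
            | none => true
            | some k => decide (t + (if strategy = "flexible" then min n (pt.2.size : Int) else n) - 2 < k))))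
      (fun t => List.map (fun j => (t + j, (pt.2.getD (t + j) PySem.Dict.empty).getD label ""))
              (PySem.List.pyRange 0 (if strategy = "flexible" then min n (pt.2.size : Int) else n) 1))
      pt.2.keys []
    refine e2.trans ?_
    rw [e3]
    simp

-- ===== VERDICT (by name: the statement is the Claim_ definition above) =====
theorem compute_consecutive_snapshots_n_spec : Claim_equal_compute_consecutive_snapshots_n := by
  intro data n label yes_label strategy _hdom hpre
  unfold Spec_compute_consecutive_snapshots_n
  simp only [compute_consecutive_snapshots_n, compute_consecutive_snapshots_n_alt]
  refine congrArg PySem.Dict.items ?_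
  refine pv_outer Prod.fst _ _ _ ?_ ?_ ?_ _ ?_
  · intro S pt hpt hS
    exact pv_step data n label yes_label strategy hpre S pt hpt hS
  · intro S pt q hq hS
    dsimp only
    split_ifs <;>
      first
        | exact hS
        | (rw [PySem.Dict.contains_insert]; simp [hS, hq])
  · exact PySem.Dict.nodup_keys_ofList _
  · intro q hq
    exact PySem.Dict.contains_empty q
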